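-- pv_equiv track=rewrite | github.com/infdahai/PE_sol | Problem_11.py | leftDiagonRight
-- ===== SOURCE A (Python) =====
-- def leftDiagonRight(a:list) -> int : # a -> int_list
--     l = len(a)
--     val = 0
--     for i in range(l-3):
--         mul1 = 1
--         for j in range(l-3):
--             mul2 = 1
--             for k in range(4):
--                 if(a[i+k][j+k]!=0):
--                     mul2 *= a[i+k][j+k]
--                 else:
--                     mul2 = 0
--                     break
--             mul1 = max(mul1, mul2)
--         val = max(mul1, val)
--     return val
-- ===== SOURCE B (Python) =====
-- def leftDiagonRight(a: list) -> int:
--     # Dynamic programming: extend down-right chain products row by row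
--     # (prev1/prev2/prev3 hold products of the 1/2/3-chains ending in the previous row).
--     l = len(a)
--     if l < 4:
--         return 0
--     best = 1
--     prev1, prev2, prev3 = [], [], []
--     for row in a:
--         cur4 = [x * y for x, y in zip(row[3:l], prev3)]
--         if cur4:
--             best = max(best, max(cur4))
--         prev3 = [x * y for x, y in zip(row[2:l], prev2)]
--         prev2 = [x * y for x, y in zip(row[1:l], prev1)]
--         prev1 = row[:l]
--     return best
-- ===== Notes on version B (the rewrite author's own statement) =====
-- stated objective: faster
-- what changed: Replaces A's brute-force triple loop (recomputing each 4-cell diagonal product from scratch with a zero-test/break) by a row-by-row dynamic programme that carries lists of 1-, 2- and 3-length diagonal chain products and extends each by one multiplication per cell via slicing and zip, taking the running max of the completed 4-chains.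
-- outside the precondition, e.g. on leftDiagonRight([[0, 0, 0, 0], [0], [0], [0]]): A returns 1, B returns 1
import Mathlib
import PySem

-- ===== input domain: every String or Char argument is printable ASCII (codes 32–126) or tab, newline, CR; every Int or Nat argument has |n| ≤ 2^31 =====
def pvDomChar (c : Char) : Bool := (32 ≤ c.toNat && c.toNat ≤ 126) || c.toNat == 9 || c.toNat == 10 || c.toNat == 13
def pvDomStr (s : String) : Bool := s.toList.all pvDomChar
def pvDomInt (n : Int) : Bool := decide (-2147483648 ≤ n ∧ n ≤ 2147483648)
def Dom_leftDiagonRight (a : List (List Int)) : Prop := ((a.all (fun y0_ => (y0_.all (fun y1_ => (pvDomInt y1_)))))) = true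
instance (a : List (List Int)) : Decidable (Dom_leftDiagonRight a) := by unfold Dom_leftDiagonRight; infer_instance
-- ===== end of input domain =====

-- B replaces A's brute-force triple loop over 4-cell windows by a row-by-row dynamic programme
-- extending 1-/2-/3-length diagonal chain-product lists (a timing run measured it faster).

-- ===== PORT A =====
-- a[i][j] with default 0 (in range under Pre_)
def pvGet2 (a : List (List Int)) (i j : Int) : Int :=
  PySem.List.pyGetD (PySem.List.pyGetD a i []) j 0

-- the 'for k in range(4)' loop with its break
def pvKLoop (a : List (List Int)) (i j : Int) : List Int → Int → Int
  | [], mul2 => mul2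
  | k :: ks, mul2 =>
    if pvGet2 a (i + k) (j + k) ≠ 0 then
      pvKLoop a i j ks (mul2 * pvGet2 a (i + k) (j + k))
    else 0

def leftDiagonRight (a : List (List Int)) : Int :=
  let l : Int := a.length
  (PySem.List.pyRange 0 (l - 3) 1).foldl (fun val i =>
    let mul1 := (PySem.List.pyRange 0 (l - 3) 1).foldl (fun mul1 j =>
      let mul2 := pvKLoop a i j (PySem.List.pyRange 0 4 1) 1
      max mul1 mul2) 1
    max mul1 val) 0

-- ===== PORT B =====
-- Python max() over a nonempty list ([] case unreachable: guarded by 'if cur4:')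
def pvMax1 : List Int → Int
  | [] => 0
  | x :: xs => xs.foldl max x

-- the loop body of B: consume one row, extending the chain-product lists
def pvStepB (l : Int) (st : Int × List Int × List Int × List Int) (row : List Int) :
    Int × List Int × List Int × List Int :=
  let cur4 := List.zipWith (fun x y => x * y) (PySem.List.slice row (some 3) (some l)) st.2.2.2
  let best := if cur4.isEmpty then st.1 else max st.1 (pvMax1 cur4)
  (best,
   PySem.List.slice row none (some l),
   List.zipWith (fun x y => x * y) (PySem.List.slice row (some 1) (some l)) st.2.1,
   List.zipWith (fun x y => x * y) (PySem.List.slice row (some 2) (some l)) st.2.2.1)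

def leftDiagonRight_alt (a : List (List Int)) : Int :=
  let l : Int := a.length
  if l < 4 then 0
  else (a.foldl (pvStepB l) (1, [], [], [])).1

-- ===== PRECONDITION & SPEC =====
-- Pre_ excludes ragged grids (some row shorter than len(a)) with 4 or more rows: there Python A
-- raises IndexError unless a zero happens to break the scan first.
def Pre_leftDiagonRight (a : List (List Int)) : Prop :=
  a.length < 4 ∨ ∀ r ∈ a, a.length ≤ r.length
instance (a : List (List Int)) : Decidable (Pre_leftDiagonRight a) := by
  unfold Pre_leftDiagonRight; infer_instance

def pvWitness_leftDiagonRight : List (List Int) :=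
  [[1, 2, 3, 4], [5, 6, 7, 8], [9, 10, 11, 12], [13, 14, 15, 16]]

def Spec_leftDiagonRight (a : List (List Int)) (out : Int) : Prop := out = leftDiagonRight_alt a
instance (a : List (List Int)) (out : Int) : Decidable (Spec_leftDiagonRight a out) := by unfold Spec_leftDiagonRight; infer_instance

-- ===== CLAIM (what is proved, stated in full; the proofs are below) =====
def Claim_equal_leftDiagonRight : Prop := ∀ (a : List (List Int)), Dom_leftDiagonRight a → Pre_leftDiagonRight a → Spec_leftDiagonRight a (leftDiagonRight a)

-- ===== LEMMAS AND PROOFS =====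

-- proof-side canonical form: max(1, max of all 4-products) for l ≥ 4, else 0
def pvProd4 (a : List (List Int)) (i j : Int) : Int :=
  pvGet2 a i j * pvGet2 a (i + 1) (j + 1) * pvGet2 a (i + 2) (j + 2) * pvGet2 a (i + 3) (j + 3)

def pvCanon (a : List (List Int)) : Int :=
  let l : Int := a.length
  if l < 4 then 0
  else max 1 (pvMax1 ((PySem.List.pyRange 0 (l - 3) 1).flatMap (fun i =>
    (PySem.List.pyRange 0 (l - 3) 1).map (fun j => pvProd4 a i j))))

-- the break-loop equals the plain 4-factor product
theorem pvKLoop_eq (a : List (List Int)) (i j : Int) :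
    pvKLoop a i j (PySem.List.pyRange 0 4 1) 1 = pvProd4 a i j := by
  have h : PySem.List.pyRange 0 4 1 = [0, 1, 2, 3] := by decide
  rw [h]
  simp only [pvKLoop, pvProd4]
  split_ifs <;> simp_all

theorem foldl_max_shift (c d : Int) (xs : List Int) :
    xs.foldl max (max c d) = max c (xs.foldl max d) := by
  induction xs generalizing d with
  | nil => simp
  | cons x xs ih => simp only [List.foldl_cons]; rw [max_assoc, ih]

theorem foldl_max_eq_pvMax1 (c x : Int) (xs : List Int) :
    (x :: xs).foldl max c = max c (pvMax1 (x :: xs)) := by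
  simp only [List.foldl_cons, pvMax1]
  exact foldl_max_shift c x xs

theorem pvMax1_cons_ne (x : Int) (xs : List Int) (h : xs ≠ []) :
    pvMax1 (x :: xs) = max x (pvMax1 xs) := by
  cases xs with
  | nil => exact absurd rfl h
  | cons y ys => simpa [pvMax1] using foldl_max_eq_pvMax1 x y ys

theorem pvMax1_append (xs ys : List Int) (hx : xs ≠ []) (hy : ys ≠ []) :
    pvMax1 (xs ++ ys) = max (pvMax1 xs) (pvMax1 ys) := by
  cases xs with
  | nil => exact absurd rfl hx
  | cons x xs =>
    cases ys with
    | nil => exact absurd rfl hy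
    | cons y ys =>
      simp only [pvMax1, List.cons_append, List.foldl_append]
      exact foldl_max_eq_pvMax1 _ y ys

theorem foldl_max_snd (g : α → Int) (c : Int) (xs : List α) :
    xs.foldl (fun m x => max m (g x)) c = (xs.map g).foldl max c := by
  induction xs generalizing c <;> simp [*]

theorem foldl_max_fst (g : Int → Int) (c : Int) (xs : List Int) :
    xs.foldl (fun m x => max (g x) m) c = (xs.map g).foldl max c := by
  induction xs generalizing c with
  | nil => simp
  | cons x xs ih => simp only [List.foldl_cons, List.map_cons]; rw [ih, max_comm]

-- distributing max 1 out of a nonempty max-of-maxes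
theorem pvMax1_flat (row : Int → List Int) (hrow : ∀ i, row i ≠ []) :
    ∀ (s : List Int), s ≠ [] →
      pvMax1 (s.map (fun i => max 1 (pvMax1 (row i)))) = max 1 (pvMax1 (s.flatMap row)) := by
  intro s
  induction s with
  | nil => intro h; exact absurd rfl h
  | cons i s ih =>
    intro _
    cases s with
    | nil => simp [pvMax1]
    | cons i' s' =>
      have hs : (i' :: s') ≠ [] := by simp
      have hflat : ((i' :: s').flatMap row) ≠ [] := by
        simp only [List.flatMap_cons]
        intro h
        exact hrow i' (List.append_eq_nil_iff.mp h).1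
      have hmap : ((i' :: s').map (fun i => max 1 (pvMax1 (row i)))) ≠ [] := by simp
      rw [List.map_cons, pvMax1_cons_ne _ _ hmap, ih hs]
      conv_rhs => rw [List.flatMap_cons]
      rw [pvMax1_append _ _ (hrow i) hflat]
      omega

-- max of maxes over nonempty rows = max of the concatenation
theorem pvMax1_flatMap (row : Nat → List Int) (hrow : ∀ i, row i ≠ []) :
    ∀ (s : List Nat), s ≠ [] →
      pvMax1 (s.map (fun i => pvMax1 (row i))) = pvMax1 (s.flatMap row) := by
  intro s
  induction s with
  | nil => intro h; exact absurd rfl h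
  | cons i s ih =>
    intro _
    cases s with
    | nil => simp [pvMax1]
    | cons i' s' =>
      have hs : (i' :: s') ≠ [] := by simp
      have hflat : ((i' :: s').flatMap row) ≠ [] := by
        simp only [List.flatMap_cons]
        intro h
        exact hrow i' (List.append_eq_nil_iff.mp h).1
      have hmap : ((i' :: s').map (fun i => pvMax1 (row i))) ≠ [] := by simp
      rw [List.map_cons, pvMax1_cons_ne _ _ hmap, ih hs]
      conv_rhs => rw [List.flatMap_cons]
      rw [pvMax1_append _ _ (hrow i) hflat]

-- A equals the canonical form
theorem A_eq_canon (a : List (List Int)) : leftDiagonRight a = pvCanon a := by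
  simp only [leftDiagonRight, pvCanon, pvKLoop_eq]
  by_cases h4 : (a.length : Int) < 4
  · rw [PySem.List.pyRange_one_eq_nil (by omega)]
    simp [h4]
  · have h3 : (0 : Int) < (a.length : Int) - 3 := by omega
    obtain ⟨z, t, hr⟩ : ∃ z t, PySem.List.pyRange 0 ((a.length : Int) - 3) 1 = z :: t :=
      ⟨0, _, PySem.List.pyRange_one_cons h3⟩
    rw [if_neg h4, hr]
    have hinner : ∀ i : Int,
        (z :: t).foldl (fun mul1 j => max mul1 (pvProd4 a i j)) 1
          = max 1 (pvMax1 ((z :: t).map (fun j => pvProd4 a i j))) := by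
      intro i
      rw [foldl_max_snd, List.map_cons, foldl_max_eq_pvMax1]
    simp only [hinner]
    rw [foldl_max_fst, List.map_cons, foldl_max_eq_pvMax1]
    have hf := pvMax1_flat (fun i => (z :: t).map (fun j => pvProd4 a i j)) (by simp) (z :: t) (by simp)
    simp only [List.map_cons] at hf ⊢
    rw [hf]
    omega

-- ===== B-side invariant machinery =====

-- grid lookup by Nat indices
def pvG (a : List (List Int)) (n k : Nat) : Int := (a.getD n []).getD k 0

-- the window-product row starting at grid row r, in B's association order
def pvW (a : List (List Int)) (r : Nat) : List Int :=
  (List.range (a.length - 3)).map (fun k =>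
    pvG a (r+3) (k+3) * (pvG a (r+2) (k+2) * (pvG a (r+1) (k+1) * pvG a r k)))

def pvQ1 (a : List (List Int)) (n : Nat) : List Int :=
  if n = 0 then [] else (List.range a.length).map (fun k => pvG a (n-1) k)

def pvQ2 (a : List (List Int)) (n : Nat) : List Int :=
  if n ≤ 1 then [] else (List.range (a.length - 1)).map (fun k => pvG a (n-1) (k+1) * pvG a (n-2) k)

def pvQ3 (a : List (List Int)) (n : Nat) : List Int :=
  if n ≤ 2 then [] else (List.range (a.length - 2)).map (fun k =>
    pvG a (n-1) (k+2) * (pvG a (n-2) (k+1) * pvG a (n-3) k))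

def pvBst (a : List (List Int)) (n : Nat) : Int :=
  (List.range (n - 3)).foldl (fun b r => max b (pvMax1 (pvW a r))) 1

def pvS (a : List (List Int)) (n : Nat) : Int × List Int × List Int × List Int :=
  (pvBst a n, pvQ1 a n, pvQ2 a n, pvQ3 a n)

-- slice of a long-enough row as a map over a range
theorem slice_row_eq (row : List Int) (m L : Nat) (hm : m ≤ L) (hL : L ≤ row.length) :
    PySem.List.slice row (some (m : Int)) (some (L : Int)) =
      (List.range (L - m)).map (fun k => row.getD (k + m) 0) := by
  rw [PySem.List.slice_natCast]
  apply List.ext_getElem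
  · simp; omega
  · intro k h1 h2
    simp only [List.getElem_take, List.getElem_drop, List.getElem_map, List.getElem_range]
    rw [List.getD_eq_getElem]
    · congr 1; omega
    · simp at h1; omega

theorem range_succ_foldl_max (W : Nat → List Int) (n : Nat) :
    (List.range (n+1)).foldl (fun b r => max b (pvMax1 (W r))) 1
      = max ((List.range n).foldl (fun b r => max b (pvMax1 (W r))) 1) (pvMax1 (W n)) := by
  rw [List.range_succ, List.foldl_append]
  rfl

theorem zipWith_range (f : Nat → Nat → Int) (n m : Nat) :
    List.zipWith f (List.range n) (List.range m) = (List.range (min n m)).map (fun k => f k k) := by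
  apply List.ext_getElem
  · simp
  · intro k h1 h2
    simp

theorem pvFold_step (a : List (List Int)) (hpre : ∀ r ∈ a, a.length ≤ r.length)
    (h4 : 4 ≤ a.length) (n : Nat) (hn : n < a.length) :
    pvStepB (a.length : Int) (pvS a n) (a[n]) = pvS a (n+1) := by
  have hrow : a.length ≤ (a[n]).length := hpre _ (a.getElem_mem hn)
  have hrowD : a[n] = a.getD n [] := by rw [List.getD_eq_getElem _ _ hn]
  have hs0 : PySem.List.slice (a[n]) none (some (a.length : Int)) =
      (List.range a.length).map (fun k => pvG a n k) := by
    rw [PySem.List.slice_to_natCast]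
    apply List.ext_getElem
    · simp; omega
    · intro k h1 h2
      simp only [List.getElem_take, List.getElem_map, List.getElem_range]
      simp only [pvG, ← hrowD]
      rw [List.getD_eq_getElem]
  have hs : ∀ m : Nat, m ≤ a.length →
      PySem.List.slice (a[n]) (some (m : Int)) (some (a.length : Int)) =
        (List.range (a.length - m)).map (fun k => pvG a n (k + m)) := by
    intro m hm
    rw [slice_row_eq _ m _ hm hrow]
    apply List.map_congr_left
    intro k _
    simp only [pvG, ← hrowD]
  have h1s := hs 1 (by omega)
  have h2s := hs 2 (by omega)
  have h3s := hs 3 (by omega)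
  norm_num at h1s h2s h3s
  simp only [pvStepB, pvS, Prod.mk.injEq, pvQ1, pvQ2, pvQ3, hs0, h1s, h2s, h3s]
  rcases Nat.lt_or_ge n 3 with h3 | h3
  · interval_cases n
    all_goals norm_num [List.zipWith_nil_right, List.zipWith_map, zipWith_range, pvBst]
    all_goals repeat rw [Nat.min_eq_left (by omega)]
  · obtain ⟨m, rfl⟩ := Nat.exists_eq_add_of_le h3
    have c1 : ¬(3 + m = 0) := by omega
    have c2 : ¬(3 + m ≤ 1) := by omega
    have c3 : ¬(3 + m ≤ 2) := by omega
    have c4 : ¬(3 + m + 1 = 0) := by omega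
    have c5 : ¬(3 + m + 1 ≤ 1) := by omega
    have c6 : ¬(3 + m + 1 ≤ 2) := by omega
    simp only [if_neg c1, if_neg c2, if_neg c3, if_neg c4, if_neg c5, if_neg c6,
               List.zipWith_map, zipWith_range]
    rw [Nat.min_eq_left (by omega), Nat.min_eq_left (by omega), Nat.min_eq_left (by omega)]
    rw [show 3 + m - 1 = 2 + m from by omega, show 3 + m - 2 = 1 + m from by omega,
        show 3 + m - 3 = m from by omega, show 3 + m + 1 - 1 = 3 + m from by omega,
        show 3 + m + 1 - 2 = 2 + m from by omega, show 3 + m + 1 - 3 = 1 + m from by omega]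
    have hne : ((List.range (a.length - 3)).map (fun k =>
        pvG a (3 + m) (k + 3) * (pvG a (2 + m) (k + 2) * (pvG a (1 + m) (k + 1) * pvG a m k)))).isEmpty = false := by
      rw [List.isEmpty_eq_false_iff, ← List.length_pos_iff]
      simp; omega
    rw [hne]
    refine ⟨?_, rfl, rfl, rfl⟩
    have hlist : (List.range (a.length - 3)).map (fun k =>
        pvG a (3 + m) (k + 3) * (pvG a (2 + m) (k + 2) * (pvG a (1 + m) (k + 1) * pvG a m k))) = pvW a m := by
      simp only [pvW]
      apply List.map_congr_left
      intro k _
      rw [show m + 3 = 3 + m from by omega, show m + 2 = 2 + m from by omega,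
          show m + 1 = 1 + m from by omega]
    rw [hlist]
    simp only [pvBst, show 3 + m + 1 - 3 = m + 1 from by omega, show 3 + m - 3 = m from by omega,
               range_succ_foldl_max]
    norm_num

theorem pvFold_aux (a : List (List Int)) (hpre : ∀ r ∈ a, a.length ≤ r.length)
    (h4 : 4 ≤ a.length) :
    ∀ (k n : Nat), n + k = a.length →
      (a.drop n).foldl (pvStepB (a.length : Int)) (pvS a n) = pvS a a.length := by
  intro k
  induction k with
  | zero =>
    intro n h
    have : n = a.length := by omega
    subst this
    rw [List.drop_length]
    rfl
  | succ k ih =>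
    intro n h
    have hn : n < a.length := by omega
    rw [List.drop_eq_getElem_cons hn, List.foldl_cons, pvFold_step a hpre h4 n hn]
    exact ih (n+1) (by omega)

theorem pvFold_inv (a : List (List Int)) (hpre : ∀ r ∈ a, a.length ≤ r.length)
    (h4 : 4 ≤ a.length) :
    (a.foldl (pvStepB (a.length : Int)) (1, [], [], [])).1 = pvBst a a.length := by
  have h0 : pvS a 0 = (1, [], [], []) := by
    simp [pvS, pvQ1, pvQ2, pvQ3, pvBst]
  have h := pvFold_aux a hpre h4 a.length 0 (by omega)
  rw [List.drop_zero, h0] at h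
  rw [h]
  rfl

theorem prod4_as_pvG (a : List (List Int)) (r k : Nat) :
    pvProd4 a (r : Int) (k : Int) =
      pvG a (r+3) (k+3) * (pvG a (r+2) (k+2) * (pvG a (r+1) (k+1) * pvG a r k)) := by
  simp only [pvProd4, pvGet2, pvG]
  norm_cast
  simp only [PySem.List.pyGetD_natCast]
  ring

theorem B_eq_canon (a : List (List Int)) (hpre : Pre_leftDiagonRight a) :
    leftDiagonRight_alt a = pvCanon a := by
  simp only [leftDiagonRight_alt, pvCanon]
  by_cases h4 : (a.length : Int) < 4
  · simp [h4]
  · have hL : 4 ≤ a.length := by omega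
    have hrows : ∀ r ∈ a, a.length ≤ r.length := by
      rcases hpre with h | h
      · omega
      · exact h
    rw [if_neg h4, if_neg h4, pvFold_inv a hrows hL]
    obtain ⟨c, hc⟩ : ∃ c, a.length - 3 = c + 1 := ⟨a.length - 4, by omega⟩
    have hWne : ∀ r : Nat, pvW a r ≠ [] := by
      intro r
      simp only [pvW, ne_eq, List.map_eq_nil_iff, List.range_eq_nil]
      omega
    have hBst : pvBst a a.length =
        max 1 (pvMax1 ((List.range (a.length - 3)).flatMap (fun r => pvW a r))) := by
      unfold pvBst
      rw [foldl_max_snd (fun r => pvMax1 (pvW a r)), hc, List.range_succ_eq_map,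
          List.map_cons, foldl_max_eq_pvMax1]
      have hmm := pvMax1_flatMap (fun r => pvW a r) hWne
        (0 :: (List.range c).map Nat.succ) (by simp)
      simp only [List.map_cons] at hmm
      rw [hmm, ← List.range_succ_eq_map, ← hc]
    rw [hBst]
    have htn : (((a.length : Int) - 3) - 0).toNat = a.length - 3 := by omega
    rw [PySem.List.pyRange_one 0 ((a.length : Int) - 3), htn]
    congr 2
    rw [List.flatMap_map]
    apply List.flatMap_congr
    intro r hr
    simp only [List.map_map]
    simp only [pvW]
    apply List.map_congr_left
    intro k hk
    simp only [Function.comp, zero_add]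
    exact (prod4_as_pvG a r k).symm

-- ===== VERDICT (by name: the statement is the Claim_ definition above) =====
theorem leftDiagonRight_spec : Claim_equal_leftDiagonRight := by
  intro a _ hpre
  unfold Spec_leftDiagonRight
  rw [B_eq_canon a hpre, A_eq_canon]
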